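-- pv_equiv track=rewrite | github.com/jh9875/PS | Python/BOJ/etc/main_7567.py | get_height_of_bowl
-- ===== SOURCE A (Python) =====
-- def get_height_of_bowl(bowl: str):
--     result = 10
--
--     for i in range(1, len(bowl)):
--         if bowl[i - 1] == bowl[i]:
--             result += 5
--         else:
--             result += 10
--
--     return result
-- ===== SOURCE B (Python) =====
-- def get_height_of_bowl(bowl: str):
--     # Divide and conquer: H(u+v) = H(u) + H(v) - 10 + joint, where the joint
--     # contributes 5 if the bowls at the split fit into each other, else 10.
--     if len(bowl) <= 1:
--         return 10
--     m = len(bowl) // 2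
--     joint = 5 if bowl[m - 1] == bowl[m] else 10
--     return get_height_of_bowl(bowl[:m]) + get_height_of_bowl(bowl[m:]) - 10 + joint
-- ===== Notes on version B (the rewrite author's own statement) =====
-- stated objective: alternative
-- what changed: Replaces A's left-to-right index loop with +5/+10 accumulation by a divide-and-conquer recursion that halves the string and recombines via H(u+v) = H(u) + H(v) - 10 + (5 if the boundary characters are equal else 10).
import Mathlib
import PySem

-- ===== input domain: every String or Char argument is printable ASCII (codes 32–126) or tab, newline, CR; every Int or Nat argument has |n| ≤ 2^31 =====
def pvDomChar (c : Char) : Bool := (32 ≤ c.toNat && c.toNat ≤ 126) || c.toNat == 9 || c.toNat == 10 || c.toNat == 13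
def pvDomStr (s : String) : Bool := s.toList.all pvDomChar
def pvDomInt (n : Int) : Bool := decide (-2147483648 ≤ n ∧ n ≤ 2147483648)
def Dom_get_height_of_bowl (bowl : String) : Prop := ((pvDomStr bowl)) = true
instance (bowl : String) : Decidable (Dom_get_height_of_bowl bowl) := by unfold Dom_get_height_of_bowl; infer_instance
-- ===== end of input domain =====

-- B replaces A's left-to-right +5/+10 accumulation loop by a divide-and-conquer recursion
-- halving the string (alternative decomposition; not claimed faster).

-- ===== PORT A =====
def get_height_of_bowl (bowl : String) : Int :=
  let l := bowl.toList
  (PySem.List.pyRange 1 (l.length : Int) 1).foldl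
    (fun result i =>
      if PySem.List.pyGet? l (i - 1) = PySem.List.pyGet? l i then result + 5 else result + 10)
    10

-- ===== PORT B =====
-- bowl[:m] / bowl[m:] with 0 ≤ m ≤ len are List.take / List.drop (PySem.List.slice_to/slice_from).
def pvGoB (l : List Char) : Int :=
  if h : l.length ≤ 1 then 10
  else
    let m := l.length / 2
    let joint : Int :=
      if PySem.List.pyGet? l ((m : Int) - 1) = PySem.List.pyGet? l (m : Int) then 5 else 10
    pvGoB (l.take m) + pvGoB (l.drop m) - 10 + joint
  termination_by l.length
  decreasing_by
    · simp only [List.length_take]; omega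
    · simp only [List.length_drop]; omega

def get_height_of_bowl_alt (bowl : String) : Int := pvGoB bowl.toList

-- ===== PRECONDITION & SPEC =====
def Spec_get_height_of_bowl (bowl : String) (out : Int) : Prop := out = get_height_of_bowl_alt bowl
instance (bowl : String) (out : Int) : Decidable (Spec_get_height_of_bowl bowl out) := by unfold Spec_get_height_of_bowl; infer_instance

-- ===== CLAIM (what is proved, stated in full; the proofs are below) =====
def Claim_equal_get_height_of_bowl : Prop := ∀ (bowl : String), Dom_get_height_of_bowl bowl → Spec_get_height_of_bowl bowl (get_height_of_bowl bowl)

-- ===== LEMMAS AND PROOFS =====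

-- number of adjacent equal pairs
def pvCnt : List Char → Nat
  | [] => 0
  | [_] => 0
  | a :: b :: t => (if a = b then 1 else 0) + pvCnt (b :: t)

theorem pvCnt_append (u v : List Char) (hu : u ≠ []) (hv : v ≠ []) :
    pvCnt (u ++ v) = pvCnt u + pvCnt v + (if u.getLast hu = v.head hv then 1 else 0) := by
  induction u with
  | nil => exact absurd rfl hu
  | cons a u ih =>
    cases u with
    | nil =>
      cases v with
      | nil => exact absurd rfl hv
      | cons c t => simp [pvCnt]; split_ifs <;> omega
    | cons b u' =>
      have := ih (by simp)
      simp only [List.cons_append, pvCnt] at *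
      rw [this]
      have hlast : (a :: b :: u').getLast hu = (b :: u').getLast (by simp) := by
        simp [List.getLast_cons]
      rw [hlast]
      split_ifs <;> omega

theorem pvCnt_take_succ (l : List Char) (k : Nat) (h1 : 1 ≤ k) (hk : k < l.length) :
    pvCnt (l.take (k + 1)) = pvCnt (l.take k) + (if l[k - 1] = l[k] then 1 else 0) := by
  have htk : l.take (k + 1) = l.take k ++ [l[k]] := by
    rw [List.take_add_one, List.getElem?_eq_getElem hk]; rfl
  have hne : l.take k ≠ [] :=
    List.ne_nil_of_length_pos (by simp [List.length_take]; omega)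
  rw [htk, pvCnt_append (l.take k) [l[k]] hne (by simp)]
  have hlen : (l.take k).length = k := by simp [List.length_take]; omega
  have hlast : (l.take k).getLast hne = l[k - 1] := by
    rw [List.getLast_eq_getElem]
    rw [List.getElem_take]
    congr 1
    omega
  rw [hlast]
  simp [pvCnt]

-- A's loop up to index k equals 10*k minus 5 times the equal pairs among the first k chars.
theorem pv_fold_eq (l : List Char) (k : Nat) (h1 : 1 ≤ k) (hk : k ≤ l.length) :
    (PySem.List.pyRange 1 (k : Int) 1).foldl
      (fun result i =>
        if PySem.List.pyGet? l (i - 1) = PySem.List.pyGet? l i then result + 5 else result + 10)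
      10
    = 10 * (k : Int) - 5 * (pvCnt (l.take k) : Int) := by
  induction k with
  | zero => omega
  | succ k ih =>
    rcases Nat.eq_or_lt_of_le h1 with h | h
    · have hk0 : k = 0 := by omega
      subst hk0
      simp [PySem.List.pyRange_one_eq_nil]
      cases l with
      | nil => simp at hk
      | cons a t => simp [pvCnt]
    · have hk1 : 1 ≤ k := by omega
      have hkn : k < l.length := by omega
      have hcast : ((k : Int) + 1) = ((k + 1 : Nat) : Int) := by push_cast; ring
      rw [← hcast, PySem.List.pyRange_one_succ_right (by exact_mod_cast hk1), List.foldl_append,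
        ih hk1 (by omega)]
      simp only [List.foldl_cons, List.foldl_nil]
      have hg1 : PySem.List.pyGet? l ((k : Int) - 1) = some l[k - 1] := by
        have : ((k : Int) - 1) = ((k - 1 : Nat) : Int) := by omega
        rw [this, PySem.List.pyGet?_natCast]
        exact List.getElem?_eq_getElem (by omega)
      have hg2 : PySem.List.pyGet? l (k : Int) = some l[k] := by
        rw [PySem.List.pyGet?_natCast]
        exact List.getElem?_eq_getElem hkn
      rw [hg1, hg2, pvCnt_take_succ l k hk1 hkn]
      by_cases hc : l[k - 1] = l[k] <;> simp [hc] <;> ring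

-- B's recursion computes the same closed form 10*len - 5*pvCnt.
theorem pvGoB_eq (n : Nat) : ∀ (l : List Char), l.length = n → l ≠ [] →
    pvGoB l = 10 * (l.length : Int) - 5 * (pvCnt l : Int) := by
  induction n using Nat.strong_induction_on with
  | _ n ih =>
    intro l hn hne
    rw [pvGoB]
    by_cases h : l.length ≤ 1
    · have h1 : l.length = 1 := by
        have := List.length_pos_of_ne_nil hne; omega
      cases l with
      | nil => simp at h1
      | cons a t =>
        cases t with
        | nil => simp [pvCnt]
        | cons b t' => simp at h1
    · simp only [h, dif_neg, not_false_iff]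
      have hlen2 : 2 ≤ l.length := by omega
      set m := l.length / 2 with hm
      have hm1 : 1 ≤ m := by omega
      have hml : m < l.length := by omega
      have htne : l.take m ≠ [] :=
        List.ne_nil_of_length_pos (by simp [List.length_take]; omega)
      have hdne : l.drop m ≠ [] :=
        List.ne_nil_of_length_pos (by simp [List.length_drop]; omega)
      have hlt1 : (l.take m).length < n := by rw [List.length_take]; omega
      have hlt2 : (l.drop m).length < n := by rw [List.length_drop]; omega
      have ht := ih (l.take m).length hlt1 (l.take m) rfl htne
      have hd := ih (l.drop m).length hlt2 (l.drop m) rfl hdne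
      rw [ht, hd]
      have hsplit : l = l.take m ++ l.drop m := (List.take_append_drop m l).symm
      have hcnt : pvCnt l = pvCnt (l.take m) + pvCnt (l.drop m) +
          (if (l.take m).getLast htne = (l.drop m).head hdne then 1 else 0) := by
        conv_lhs => rw [hsplit]
        exact pvCnt_append _ _ htne hdne
      have hlast : (l.take m).getLast htne = l[m - 1] := by
        rw [List.getLast_eq_getElem, List.getElem_take]
        congr 1
        simp [List.length_take]
        omega
      have hhead : (l.drop m).head hdne = l[m] := by
        rw [List.head_eq_getElem, List.getElem_drop]
        congr 1
      have hg1 : PySem.List.pyGet? l ((m : Int) - 1) = some l[m - 1] := by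
        have : ((m : Int) - 1) = ((m - 1 : Nat) : Int) := by omega
        rw [this, PySem.List.pyGet?_natCast]
        exact List.getElem?_eq_getElem (by omega)
      have hg2 : PySem.List.pyGet? l (m : Int) = some l[m] := by
        rw [PySem.List.pyGet?_natCast]
        exact List.getElem?_eq_getElem hml
      rw [hg1, hg2]
      have hlen' : (l.take m).length = m := by simp [List.length_take]; omega
      have hlen'' : (l.drop m).length = l.length - m := by simp [List.length_drop]
      rw [hcnt, hlast, hhead, hlen', hlen'']
      by_cases hc : l[m - 1] = l[m] <;> simp [hc] <;> omega

-- ===== VERDICT (by name: the statement is the Claim_ definition above) =====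
theorem get_height_of_bowl_spec : Claim_equal_get_height_of_bowl := by
  intro bowl _
  unfold Spec_get_height_of_bowl get_height_of_bowl get_height_of_bowl_alt
  set l := bowl.toList with hl
  by_cases hnil : l = []
  · rw [hnil]
    simp [PySem.List.pyRange_one_eq_nil, pvGoB]
  · have hlen : 1 ≤ l.length := List.length_pos_of_ne_nil hnil
    have hA := pv_fold_eq l l.length hlen le_rfl
    have hB := pvGoB_eq l.length l rfl hnil
    simp only [List.take_length] at hA
    rw [hA, hB]
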